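-- pv_equiv track=rewrite | github.com/andrewstellman/octobatch | scripts/tui/screens/main_screen.py | _parse_step_from_state
-- ===== SOURCE A (Python) =====
-- def _parse_step_from_state(state: str) -> str | None:
--     """Extract step name from chunk state like 'generate_SUBMITTED'."""
--     if not state:
--         return None
--
--     # States look like: generate_SUBMITTED, score_coherence_PENDING, VALIDATED
--     if state in ("VALIDATED", "PENDING", "FAILED"):
--         return None
--
--     # Remove the status suffix
--     for suffix in ["_SUBMITTED", "_PENDING", "_COMPLETE"]:
--         if state.endswith(suffix):
--             return state[:-len(suffix)]
--
--     return None
-- ===== SOURCE B (Python) =====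
-- def _parse_step_from_state(state: str) -> str | None:
--     """Extract step name from chunk state like 'generate_SUBMITTED'."""
--     i = state.rfind('_')
--     if i < 0:
--         return None
--     if state[i + 1:] in ('SUBMITTED', 'PENDING', 'COMPLETE'):
--         return state[:i]
--     return None
-- ===== Notes on version B (the rewrite author's own statement) =====
-- stated objective: idiomatic
-- what changed: Replaces the try-each-suffix loop (and the explicit empty/blacklist guards) by locating the last underscore with rfind once, slicing out the status token and testing it against the active-status set.
import Mathlib
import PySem

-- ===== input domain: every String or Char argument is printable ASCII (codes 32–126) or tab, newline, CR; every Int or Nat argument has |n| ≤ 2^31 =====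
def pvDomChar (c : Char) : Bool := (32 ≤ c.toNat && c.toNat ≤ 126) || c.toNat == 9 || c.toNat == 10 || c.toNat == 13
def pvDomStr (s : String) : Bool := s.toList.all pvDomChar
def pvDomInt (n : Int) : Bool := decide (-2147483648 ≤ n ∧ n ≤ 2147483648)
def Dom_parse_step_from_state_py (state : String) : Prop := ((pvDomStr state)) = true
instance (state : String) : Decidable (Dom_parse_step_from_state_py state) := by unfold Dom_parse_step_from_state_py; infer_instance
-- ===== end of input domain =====

-- B replaces A's try-each-suffix loop by one rfind of the last underscore plus a set lookup of the status token (idiomatic; same cost).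


-- ===== PORT A =====
-- literal transliteration of A: empty guard, blacklist, then try each suffix in order
def parse_step_from_state_py (state : String) : Option String :=
  if state = "" then none
  else if state = "VALIDATED" ∨ state = "PENDING" ∨ state = "FAILED" then none
  else if PySem.Str.endswith state "_SUBMITTED" then some (PySem.Str.slice state none (some (-10)))
  else if PySem.Str.endswith state "_PENDING" then some (PySem.Str.slice state none (some (-8)))
  else if PySem.Str.endswith state "_COMPLETE" then some (PySem.Str.slice state none (some (-9)))
  else none

-- ===== PORT B =====
-- literal transliteration of B: find the last '_' with rfind, slice out the status token, look it up
def parse_step_from_state_py_alt (state : String) : Option String :=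
  let i := PySem.Str.rfind state "_"
  if i < 0 then none
  else
    let status := PySem.Str.slice state (some (i + 1)) none
    if status = "SUBMITTED" ∨ status = "PENDING" ∨ status = "COMPLETE" then
      some (PySem.Str.slice state none (some i))
    else none

-- ===== PRECONDITION & SPEC =====
def Spec_parse_step_from_state_py (state : String) (out : Option String) : Prop := out = parse_step_from_state_py_alt state
instance (state : String) (out : Option String) : Decidable (Spec_parse_step_from_state_py state out) := by unfold Spec_parse_step_from_state_py; infer_instance

-- ===== CLAIM (what is proved, stated in full; the proofs are below) =====
def Claim_equal_parse_step_from_state_py : Prop := ∀ (state : String), Dom_parse_step_from_state_py state → Spec_parse_step_from_state_py state (parse_step_from_state_py state)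

-- ===== LEMMAS AND PROOFS =====

theorem pv_pre1 (t : List Char) : (['_'].isPrefixOf t = true) ↔ t.head? = some '_' := by
  cases t with
  | nil => decide
  | cons c t' =>
    rw [List.isPrefixOf_iff_prefix, List.cons_prefix_cons]
    simp [eq_comm]

theorem pv_split_last (l : List Char) :
    ('_' ∉ l) ∨ ∃ p r, l = p ++ '_' :: r ∧ '_' ∉ r := by
  induction l using List.reverseRecOn with
  | nil => exact Or.inl (by simp)
  | append_singleton xs c ih =>
    by_cases hc : c = '_'
    · exact Or.inr ⟨xs, [], by simp [hc], by simp⟩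
    · rcases ih with h | ⟨p, r, hl, hr⟩
      · exact Or.inl (by simp [h]; exact fun hh => hc hh.symm)
      · exact Or.inr ⟨p, r ++ [c], by simp [hl], by simp [hr]; exact fun hh => hc hh.symm⟩

theorem pv_go_none (l : List Char) (h : '_' ∉ l) (k : Nat) :
    PySem.Chars.rfind.go l ['_'] k = -1 := by
  induction k with
  | zero =>
    have hnp : ¬ (['_'].isPrefixOf l = true) := by
      rw [pv_pre1]; intro hh
      exact h (List.mem_of_mem_head? (Option.mem_def.mpr hh))
    simp [PySem.Chars.rfind.go, hnp]
  | succ j ih =>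
    have hnp : ¬ (['_'].isPrefixOf (l.drop (j + 1)) = true) := by
      rw [pv_pre1]; intro hh
      exact h (List.mem_of_mem_drop (List.mem_of_mem_head? (Option.mem_def.mpr hh)))
    simp [PySem.Chars.rfind.go, hnp, ih]

theorem pv_rfind_none (l : List Char) (h : '_' ∉ l) : PySem.Chars.rfind l ['_'] = -1 := by
  simpa [PySem.Chars.rfind] using pv_go_none l h l.length

theorem pv_go_split (p r : List Char) (hr : '_' ∉ r) (k : Nat) (hk : p.length ≤ k) :
    PySem.Chars.rfind.go (p ++ '_' :: r) ['_'] k = p.length := by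
  induction k with
  | zero =>
    have hp : p = [] := List.eq_nil_of_length_eq_zero (Nat.le_zero.mp hk)
    subst hp
    simp [PySem.Chars.rfind.go]
  | succ j ih =>
    rcases Nat.lt_or_ge p.length (j + 1) with hlt | hge
    · have hdrop : List.drop (j + 1) (p ++ '_' :: r) = List.drop (j - p.length) r := by
        rw [show p ++ '_' :: r = (p ++ ['_']) ++ r by simp,
            show j + 1 = (p ++ ['_']).length + (j - p.length) by simp; omega,
            List.drop_append]
        simp
      have hnp : ¬ (['_'].isPrefixOf ((p ++ '_' :: r).drop (j + 1)) = true) := by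
        rw [pv_pre1, hdrop]; intro hh
        exact hr (List.mem_of_mem_drop (List.mem_of_mem_head? (Option.mem_def.mpr hh)))
      simp [PySem.Chars.rfind.go, hnp, ih (by omega)]
    · have heq : p.length = j + 1 := le_antisymm hk hge
      have hpre : ['_'].isPrefixOf ((p ++ '_' :: r).drop (j + 1)) = true := by
        rw [pv_pre1, ← heq, List.drop_left]
        simp
      simp [PySem.Chars.rfind.go, heq]

theorem pv_rfind_split (p r : List Char) (hr : '_' ∉ r) :
    PySem.Chars.rfind (p ++ '_' :: r) ['_'] = (p.length : Int) := by
  have := pv_go_split p r hr (p ++ '_' :: r).length (by simp)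
  simpa [PySem.Chars.rfind] using this

theorem pv_suffix_det (p r X : List Char) (hr : '_' ∉ r) (hX : '_' ∉ X) :
    ('_' :: X <:+ p ++ '_' :: r) ↔ X = r := by
  constructor
  · intro h
    have h2 : '_' :: r <:+ p ++ '_' :: r := ⟨p, rfl⟩
    rcases Nat.lt_trichotomy X.length r.length with hlt | heq | hgt
    · have h3 := List.suffix_of_suffix_length_le h h2 (by simp; omega)
      rcases List.suffix_cons_iff.mp h3 with h4 | h4
      · exact absurd (congrArg List.length h4) (by simp; omega)
      · exact absurd (h4.subset (by simp)) hr
    · have h4 := List.suffix_of_suffix_length_le h h2 (by simp [heq])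
      have h5 := List.IsSuffix.eq_of_length h4 (by simp [heq])
      simpa using h5
    · have h3 := List.suffix_of_suffix_length_le h2 h (by simp; omega)
      rcases List.suffix_cons_iff.mp h3 with h4 | h4
      · exact absurd (congrArg List.length h4) (by simp; omega)
      · exact absurd (h4.subset (by simp)) hX
  · rintro rfl; exact ⟨p, rfl⟩

theorem pv_main (state : String) :
    parse_step_from_state_py state = parse_step_from_state_py_alt state := by
  rcases pv_split_last state.toList with h | ⟨p, r, hl, hr⟩
  · -- no underscore in state: both sides are none
    have hi : PySem.Str.rfind state "_" = -1 := by
      rw [PySem.Str.rfind_eq]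
      exact pv_rfind_none _ h
    have hB : parse_step_from_state_py_alt state = none := by
      unfold parse_step_from_state_py_alt
      rw [hi]
      rw [if_pos (by omega : (-1 : Int) < 0)]
    have hns : ∀ t : String, '_' ∈ t.toList → PySem.Str.endswith state t = false := by
      intro t ht
      rw [PySem.Str.endswith_eq]
      by_contra hc
      simp only [Bool.not_eq_false] at hc
      exact h (((PySem.Chars.endswith_iff state.toList t.toList).mp hc).subset ht)
    rw [hB]
    unfold parse_step_from_state_py
    rw [hns "_SUBMITTED" (by decide), hns "_PENDING" (by decide), hns "_COMPLETE" (by decide)]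
    split_ifs <;> first | rfl | contradiction
  · -- state = p ++ '_' :: r with r underscore-free
    have hi : PySem.Str.rfind state "_" = (p.length : Int) := by
      rw [PySem.Str.rfind_eq, hl, show ("_" : String).toList = ['_'] from by decide]
      exact pv_rfind_split p r hr
    have hst : (PySem.Str.slice state (some ((p.length : Int) + 1)) none).toList = r := by
      rw [PySem.Str.toList_slice, PySem.Chars.slice_eq_listSlice,
          PySem.List.slice_from _ (by omega : (0 : Int) ≤ (p.length : Int) + 1),
          show ((p.length : Int) + 1).toNat = p.length + 1 from by omega, hl,
          show p ++ '_' :: r = (p ++ ['_']) ++ r from by simp,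
          show p.length + 1 = (p ++ ['_']).length from by simp, List.drop_left]
    have htake : (PySem.Str.slice state none (some (p.length : Int))).toList = p := by
      rw [PySem.Str.toList_slice, PySem.Chars.slice_eq_listSlice,
          PySem.List.slice_to_natCast, hl, List.take_left]
    have hne : ¬ (state = "") := by
      intro he
      rw [he] at hl
      exact absurd hl (by simp)
    have hmem : '_' ∈ state.toList := by rw [hl]; simp
    have hbl : ¬ (state = "VALIDATED" ∨ state = "PENDING" ∨ state = "FAILED") := by
      rintro (he | he | he) <;> rw [he] at hmem <;> revert hmem <;> decide
    have hend : ∀ t X : String, t.toList = '_' :: X.toList → '_' ∉ X.toList →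
        (PySem.Str.endswith state t = true ↔ r = X.toList) := by
      intro t X htl hX
      rw [PySem.Str.endswith_eq, PySem.Chars.endswith_iff, hl, htl]
      constructor
      · intro hx
        exact ((pv_suffix_det p r _ hr hX).mp hx).symm
      · intro hx
        exact (pv_suffix_det p r _ hr hX).mpr hx.symm
    have hendS := hend "_SUBMITTED" "SUBMITTED" (by decide) (by decide)
    have hendP := hend "_PENDING" "PENDING" (by decide) (by decide)
    have hendC := hend "_COMPLETE" "COMPLETE" (by decide) (by decide)
    have hnlt : ¬ ((p.length : Int) < 0) := by omega
    have hout : ∀ k : Int, 0 < k →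
        state.toList.length = p.length + k.toNat →
        PySem.Str.slice state none (some (-k)) = PySem.Str.slice state none (some (p.length : Int)) := by
      intro k hk hlen
      refine String.toList_inj.mp ?_
      rw [htake, PySem.Str.toList_slice, PySem.Chars.slice_eq_listSlice,
          show (-k) = (-(k.toNat : Nat) : Int) from by omega,
          PySem.List.slice_to_neg_natCast _ _ (by omega : 0 < k.toNat),
          hlen, Nat.add_sub_cancel, hl, List.take_left']
      rfl
    by_cases h1 : r = "SUBMITTED".toList
    · have hstS : PySem.Str.slice state (some ((p.length : Int) + 1)) none = "SUBMITTED" :=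
        String.toList_inj.mp (by rw [hst, h1])
      have hB : parse_step_from_state_py_alt state =
          some (PySem.Str.slice state none (some (p.length : Int))) := by
        unfold parse_step_from_state_py_alt
        rw [hi]
        rw [if_neg hnlt, if_pos (Or.inl hstS)]
      have hA : parse_step_from_state_py state =
          some (PySem.Str.slice state none (some (-10))) := by
        unfold parse_step_from_state_py
        rw [if_neg hne, if_neg hbl, if_pos (hendS.mpr h1)]
      rw [hA, hB, hout 10 (by omega) (by rw [hl, h1]; simp)]
    · by_cases h2 : r = "PENDING".toList
      · have hstP : PySem.Str.slice state (some ((p.length : Int) + 1)) none = "PENDING" :=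
          String.toList_inj.mp (by rw [hst, h2])
        have hB : parse_step_from_state_py_alt state =
            some (PySem.Str.slice state none (some (p.length : Int))) := by
          unfold parse_step_from_state_py_alt
          rw [hi]
          rw [if_neg hnlt, if_pos (Or.inr (Or.inl hstP))]
        have hA : parse_step_from_state_py state =
            some (PySem.Str.slice state none (some (-8))) := by
          unfold parse_step_from_state_py
          rw [if_neg hne, if_neg hbl,
              if_neg (by rw [hendS]; rw [h2]; decide), if_pos (hendP.mpr h2)]
        rw [hA, hB, hout 8 (by omega) (by rw [hl, h2]; simp)]
      · by_cases h3 : r = "COMPLETE".toList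
        · have hstC : PySem.Str.slice state (some ((p.length : Int) + 1)) none = "COMPLETE" :=
            String.toList_inj.mp (by rw [hst, h3])
          have hB : parse_step_from_state_py_alt state =
              some (PySem.Str.slice state none (some (p.length : Int))) := by
            unfold parse_step_from_state_py_alt
            rw [hi]
            rw [if_neg hnlt, if_pos (Or.inr (Or.inr hstC))]
          have hA : parse_step_from_state_py state =
              some (PySem.Str.slice state none (some (-9))) := by
            unfold parse_step_from_state_py
            rw [if_neg hne, if_neg hbl,
                if_neg (by rw [hendS]; rw [h3]; decide),
                if_neg (by rw [hendP]; rw [h3]; decide), if_pos (hendC.mpr h3)]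
          rw [hA, hB, hout 9 (by omega) (by rw [hl, h3]; simp)]
        · -- status is none of the three: both sides are none
          have hB : parse_step_from_state_py_alt state = none := by
            have hno : ¬ (PySem.Str.slice state (some ((p.length : Int) + 1)) none = "SUBMITTED" ∨
                PySem.Str.slice state (some ((p.length : Int) + 1)) none = "PENDING" ∨
                PySem.Str.slice state (some ((p.length : Int) + 1)) none = "COMPLETE") := by
              rintro (hx | hx | hx)
              · exact h1 (by rw [← hst, hx])
              · exact h2 (by rw [← hst, hx])
              · exact h3 (by rw [← hst, hx])
            unfold parse_step_from_state_py_alt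
            rw [hi]
            rw [if_neg hnlt, if_neg hno]
          have hA : parse_step_from_state_py state = none := by
            unfold parse_step_from_state_py
            rw [if_neg hne, if_neg hbl,
                if_neg (by rw [hendS]; exact h1), if_neg (by rw [hendP]; exact h2),
                if_neg (by rw [hendC]; exact h3)]
          rw [hA, hB]

-- ===== VERDICT (by name: the statement is the Claim_ definition above) =====
theorem parse_step_from_state_py_spec : Claim_equal_parse_step_from_state_py := by
  intro state _
  unfold Spec_parse_step_from_state_py
  exact pv_main state
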